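-- pv_equiv track=rewrite | github.com/erdc/proteus | proteus/tests/proteus_tutorial/2d/extras/stepped_spillway_geom.py | v_flags
-- ===== SOURCE A (Python) =====
-- def v_flags(vertices,boundaryTags):
--     vertexFlags=[]
--     for i in range(len(vertices)):
--         if i < (len(vertices)-3):
--                 vertexFlags.append(boundaryTags['bottom'])
--         elif i == (len(vertices)-3):
--                 vertexFlags.append(boundaryTags['outflow'])
--         elif i == (len(vertices)-2):
--                 vertexFlags.append(boundaryTags['top'])
--         elif i == (len(vertices)-1):
--                 vertexFlags.append(boundaryTags['inflow'])
--     return vertexFlags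
-- ===== SOURCE B (Python) =====
-- def v_flags(vertices, boundaryTags):
--     # Walk the vertices back-to-front, consuming a queue of the three named
--     # tail keys first and 'bottom' once the queue is empty; reverse at the end.
--     out = []
--     queue = ['inflow', 'top', 'outflow']
--     for _ in reversed(vertices):
--         out.append(boundaryTags[queue.pop(0) if queue else 'bottom'])
--     out.reverse()
--     return out
-- ===== Notes on version B (the rewrite author's own statement) =====
-- stated objective: alternative
-- what changed: Instead of a forward index loop with four length-relative comparisons per element, B walks the vertices back-to-front consuming a three-element key queue ('inflow','top','outflow') that degrades to 'bottom' once empty, then reverses the accumulated flags; no index arithmetic or per-element comparisons against len(vertices).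
import Mathlib
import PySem

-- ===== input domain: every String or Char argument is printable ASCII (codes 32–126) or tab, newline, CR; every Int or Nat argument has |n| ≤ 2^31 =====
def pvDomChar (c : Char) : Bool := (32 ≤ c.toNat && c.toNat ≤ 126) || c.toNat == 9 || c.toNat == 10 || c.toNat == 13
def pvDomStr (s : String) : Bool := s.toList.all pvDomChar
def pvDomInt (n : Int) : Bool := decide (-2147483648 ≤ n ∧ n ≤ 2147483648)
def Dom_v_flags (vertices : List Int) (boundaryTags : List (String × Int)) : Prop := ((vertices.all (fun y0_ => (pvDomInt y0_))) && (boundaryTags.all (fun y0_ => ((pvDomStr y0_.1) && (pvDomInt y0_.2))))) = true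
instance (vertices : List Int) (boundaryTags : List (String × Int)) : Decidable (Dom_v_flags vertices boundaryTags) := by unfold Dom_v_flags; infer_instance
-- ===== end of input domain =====

-- B replaces A's forward index loop with four length-relative comparisons by a backward
-- walk that consumes a three-key queue (then 'bottom') and reverses the result: an
-- alternative decomposition with no index arithmetic, same cost.


-- ===== PORT A =====
-- boundaryTags[k]: first-match association-list lookup; the default 0 is only reached
-- on a missing key, which is a Python KeyError and excluded by Pre_v_flags.
def pvTag (boundaryTags : List (String × Int)) (k : String) : Int :=
  PySem.Dict.getD (PySem.Dict.mk boundaryTags) k 0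

def v_flags (vertices : List Int) (boundaryTags : List (String × Int)) : List Int :=
  (PySem.List.pyRange 0 (PySem.List.len vertices) 1).foldl
    (fun vertexFlags i =>
      if i < PySem.List.len vertices - 3 then vertexFlags ++ [pvTag boundaryTags "bottom"]
      else if i = PySem.List.len vertices - 3 then vertexFlags ++ [pvTag boundaryTags "outflow"]
      else if i = PySem.List.len vertices - 2 then vertexFlags ++ [pvTag boundaryTags "top"]
      else if i = PySem.List.len vertices - 1 then vertexFlags ++ [pvTag boundaryTags "inflow"]
      else vertexFlags) []

-- ===== PORT B =====
-- one loop step of Source B: append the tag of the head of the key queue (or 'bottom'),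
-- popping the queue; the vertex value itself is unused, as in 'for _ in reversed(vertices)'
def pvStepB (boundaryTags : List (String × Int))
    (st : List Int × List String) (_v : Int) : List Int × List String :=
  match st.2 with
  | [] => (st.1 ++ [pvTag boundaryTags "bottom"], [])
  | k :: ks => (st.1 ++ [pvTag boundaryTags k], ks)

def v_flags_alt (vertices : List Int) (boundaryTags : List (String × Int)) : List Int :=
  let s := vertices.reverse.foldl (pvStepB boundaryTags) ([], ["inflow", "top", "outflow"])
  s.1.reverse

-- ===== PRECONDITION & SPEC =====
-- Pre_ excludes exactly the inputs on which Python A raises KeyError: the boundary-tag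
-- keys the loop actually reads (given the vertex count) must be present.
def Pre_v_flags (vertices : List Int) (boundaryTags : List (String × Int)) : Prop :=
  (3 < vertices.length → (PySem.Dict.mk boundaryTags).contains "bottom" = true) ∧
  (3 ≤ vertices.length → (PySem.Dict.mk boundaryTags).contains "outflow" = true) ∧
  (2 ≤ vertices.length → (PySem.Dict.mk boundaryTags).contains "top" = true) ∧
  (1 ≤ vertices.length → (PySem.Dict.mk boundaryTags).contains "inflow" = true)
instance (vertices : List Int) (boundaryTags : List (String × Int)) : Decidable (Pre_v_flags vertices boundaryTags) := by unfold Pre_v_flags; infer_instance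

def pvWitness_v_flags : List Int × (List (String × Int)) :=
  ([0, 1, 2, 3, 4], [("bottom", 1), ("outflow", 2), ("top", 3), ("inflow", 4)])

def Spec_v_flags (vertices : List Int) (boundaryTags : List (String × Int)) (out : List Int) : Prop := out = v_flags_alt vertices boundaryTags
instance (vertices : List Int) (boundaryTags : List (String × Int)) (out : List Int) : Decidable (Spec_v_flags vertices boundaryTags out) := by unfold Spec_v_flags; infer_instance

-- ===== CLAIM (what is proved, stated in full; the proofs are below) =====
def Claim_equal_v_flags : Prop := ∀ (vertices : List Int) (boundaryTags : List (String × Int)), Dom_v_flags vertices boundaryTags → Pre_v_flags vertices boundaryTags → Spec_v_flags vertices boundaryTags (v_flags vertices boundaryTags)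

-- ===== LEMMAS AND PROOFS =====

-- the branch value A's loop appends at index j, when the vertex count is m
def pvBranch (m : Nat) (b o t i : Int) (j : Int) : Int :=
  if j < (m : Int) - 3 then b
  else if j = (m : Int) - 3 then o
  else if j = (m : Int) - 2 then t
  else i

-- A's loop evaluates to 'bottoms then the named tail, clamped'
theorem pv_core (m : Nat) (b o t i : Int) :
    (PySem.List.pyRange 0 (m : Int) 1).foldl
      (fun acc j =>
        if j < (m : Int) - 3 then acc ++ [b]
        else if j = (m : Int) - 3 then acc ++ [o]
        else if j = (m : Int) - 2 then acc ++ [t]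
        else if j = (m : Int) - 1 then acc ++ [i]
        else acc) []
    = List.replicate (m - 3) b ++ ([o, t, i].drop (3 - m)) := by
  match m, Nat.lt_or_ge m 3 with
  | 0, _ => rfl
  | 1, _ => rfl
  | 2, _ => rfl
  | (k + 3), _ =>
      have hcongr := PySem.List.foldl_congr_mem
            (l := PySem.List.pyRange 0 ((k + 3 : Nat) : Int) 1) (init := ([] : List Int))
            (f := fun acc j =>
              if j < ((k + 3 : Nat) : Int) - 3 then acc ++ [b]
              else if j = ((k + 3 : Nat) : Int) - 3 then acc ++ [o]
              else if j = ((k + 3 : Nat) : Int) - 2 then acc ++ [t]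
              else if j = ((k + 3 : Nat) : Int) - 1 then acc ++ [i]
              else acc)
            (g := fun acc j => acc ++ [pvBranch (k + 3) b o t i j])
            (by
              intro acc x hx
              have hx' := (PySem.List.mem_pyRange_one).1 hx
              simp only [pvBranch]
              split_ifs with h1 h2 h3 h4 <;> try rfl
              omega)
      rw [hcongr, PySem.List.foldl_append_singleton_eq_map, PySem.List.pyRange_zero_natCast,
          List.map_map]
      have h1 : k + 3 - 3 = k := by omega
      have h2 : 3 - (k + 3) = 0 := by omega
      rw [h1, h2, List.range_add]
      simp only [List.map_append, List.map_map]
      have hrange3 : List.range 3 = [0, 1, 2] := rfl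
      have hrep : (List.range k).map (pvBranch (k + 3) b o t i ∘ fun j => ((j : Nat) : Int)) =
          List.replicate k b := by
        rw [List.eq_replicate_iff]
        refine ⟨by simp, ?_⟩
        intro x hx
        obtain ⟨j, hj, rfl⟩ := List.mem_map.1 hx
        have hj' := List.mem_range.1 hj
        simp only [Function.comp_apply, pvBranch]
        rw [if_pos (by push_cast; omega)]
      have ho : pvBranch (k + 3) b o t i ((k : Nat) : Int) = o := by
        simp only [pvBranch]
        rw [if_neg (by push_cast; omega), if_pos (by push_cast; omega)]
      have ht : pvBranch (k + 3) b o t i (((k : Nat) : Int) + 1) = t := by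
        simp only [pvBranch]
        rw [if_neg (by push_cast; omega), if_neg (by push_cast; omega),
            if_pos (by push_cast; omega)]
      have hi : pvBranch (k + 3) b o t i (((k : Nat) : Int) + 2) = i := by
        simp only [pvBranch]
        rw [if_neg (by push_cast; omega), if_neg (by push_cast; omega),
            if_neg (by push_cast; omega)]
      simp [hrange3, hrep, ho, ht, hi]

-- once the key queue is empty, every further step of B appends a 'bottom'
theorem pv_fold_bottom (boundaryTags : List (String × Int)) (l : List Int) (acc : List Int) :
    l.foldl (pvStepB boundaryTags) (acc, []) =
      (acc ++ List.replicate l.length (pvTag boundaryTags "bottom"), []) := by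
  induction l generalizing acc with
  | nil => simp
  | cons x xs ih =>
      simp only [List.foldl_cons, pvStepB, ih, List.append_assoc, List.length_cons,
        List.replicate_succ, List.cons_append, List.nil_append, List.singleton_append]

-- B's backward fold, reversed, is the same 'bottoms then named tail' list
theorem pv_B_eval (boundaryTags : List (String × Int)) (l : List Int) :
    (l.foldl (pvStepB boundaryTags) ([], ["inflow", "top", "outflow"])).1.reverse
    = List.replicate (l.length - 3) (pvTag boundaryTags "bottom")
        ++ ([pvTag boundaryTags "outflow", pvTag boundaryTags "top",
             pvTag boundaryTags "inflow"].drop (3 - l.length)) := by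
  match l with
  | [] => simp
  | [a] => simp [pvStepB]
  | [a, b] => simp [pvStepB]
  | a :: b :: c :: rest =>
      show ((rest.foldl (pvStepB boundaryTags)
        (pvStepB boundaryTags (pvStepB boundaryTags (pvStepB boundaryTags
          ([], ["inflow", "top", "outflow"]) a) b) c)).1).reverse = _
      simp only [pvStepB]
      rw [pv_fold_bottom]
      simp

-- ===== VERDICT (by name: the statement is the Claim_ definition above) =====
theorem v_flags_spec : Claim_equal_v_flags := by
  intro vertices boundaryTags _ _
  unfold Spec_v_flags v_flags v_flags_alt
  rw [pv_B_eval, List.length_reverse]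
  simp only [PySem.List.len_eq]
  exact pv_core vertices.length (pvTag boundaryTags "bottom") (pvTag boundaryTags "outflow")
    (pvTag boundaryTags "top") (pvTag boundaryTags "inflow")
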